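-- pv_equiv track=rewrite | github.com/lucadebeir/MathDecision | DD/DD/DD.py | findBestTrinome
-- ===== SOURCE A (Python) =====
-- def findBestTrinome(newMatrice):
--     j=0
--     k=0
--     allBestTrinome=[]
--     while(j<len(newMatrice)):
--         if(newMatrice[k][3]<newMatrice[j][3]):
--             k=j
--         j=j+1
--     allBestTrinome.append(newMatrice[k])
--     j=0
--     while(j<len(newMatrice)):
--         if(newMatrice[j][2]==newMatrice[k][2] and k!=j):
--             allBestTrinome.append(newMatrice[j])
--         j=j+1
--     return allBestTrinome
-- ===== SOURCE B (Python) =====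
-- def findBestTrinome(newMatrice):
--     groups = {}
--     best = None
--     for i, row in enumerate(newMatrice):
--         groups.setdefault(row[2], []).append((i, row))
--         if best is None or newMatrice[best][3] < row[3]:
--             best = i
--     winner = newMatrice[best]
--     return [winner] + [r for i, r in groups[winner[2]] if i != best]
-- ===== Notes on version B (the rewrite author's own statement) =====
-- stated objective: alternative
-- what changed: Replaces A's two index-based while loops (argmax scan, then a second full scan comparing column 2) by a single pass that groups rows by their column-2 value in a dict while tracking the argmax row, then reads the winner's group out of the dict, excluding the winner by index.
import Mathlib
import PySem

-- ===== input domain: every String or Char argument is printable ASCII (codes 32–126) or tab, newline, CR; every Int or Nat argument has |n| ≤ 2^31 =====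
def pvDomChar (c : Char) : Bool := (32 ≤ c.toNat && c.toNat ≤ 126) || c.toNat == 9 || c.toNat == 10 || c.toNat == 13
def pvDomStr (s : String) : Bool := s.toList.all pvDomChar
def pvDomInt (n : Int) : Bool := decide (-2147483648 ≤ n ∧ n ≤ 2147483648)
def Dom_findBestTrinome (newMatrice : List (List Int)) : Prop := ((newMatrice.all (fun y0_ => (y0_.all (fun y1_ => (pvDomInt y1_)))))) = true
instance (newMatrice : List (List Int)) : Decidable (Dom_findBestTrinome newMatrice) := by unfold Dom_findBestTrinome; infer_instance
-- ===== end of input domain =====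

-- B changes the decomposition: one pass that groups rows by column-2 in a dict while tracking
-- the first argmax-by-column-3 row, instead of A's two separate index-driven while loops.

-- ===== PORT A =====
def findBestTrinome (newMatrice : List (List Int)) : List (List Int) :=
  -- first while loop: argmax over column 3, strict '<' keeps the first maximum
  let k := (PySem.List.pyRange 0 (newMatrice.length : Int) 1).foldl
    (fun k j =>
      if PySem.List.pyGetD (PySem.List.pyGetD newMatrice k []) 3 0 <
         PySem.List.pyGetD (PySem.List.pyGetD newMatrice j []) 3 0 then j else k) 0
  -- allBestTrinome.append(newMatrice[k])
  let allBestTrinome := [PySem.List.pyGetD newMatrice k []]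
  -- second while loop: 'if newMatrice[j][2]==newMatrice[k][2] and k!=j: append'
  (PySem.List.pyRange 0 (newMatrice.length : Int) 1).foldl
    (fun acc j =>
      if PySem.List.pyGetD (PySem.List.pyGetD newMatrice j []) 2 0 ==
           PySem.List.pyGetD (PySem.List.pyGetD newMatrice k []) 2 0 && k != j
      then acc ++ [PySem.List.pyGetD newMatrice j []] else acc) allBestTrinome

-- ===== PORT B =====
def findBestTrinome_alt (newMatrice : List (List Int)) : List (List Int) :=
  -- single for-loop: build the groups dict and track the best index
  let st := (PySem.List.enumerate newMatrice 0).foldl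
    (fun (st : PySem.Dict Int (List (Int × List Int)) × Option Int) p =>
      (st.1.modify (PySem.List.pyGetD p.2 2 0) [] (· ++ [p]),
       match st.2 with
       | none => some p.1
       | some b =>
         if PySem.List.pyGetD (PySem.List.pyGetD newMatrice b []) 3 0 <
            PySem.List.pyGetD p.2 3 0 then some p.1 else some b))
    (PySem.Dict.empty, none)
  match st.2 with
  | none => []   -- unreachable: Python B raises here (empty input), which Pre_ excludes
  | some b =>
    let winner := PySem.List.pyGetD newMatrice b []
    winner :: ((st.1.getD (PySem.List.pyGetD winner 2 0) []).filter
                 (fun p => p.1 != b)).map (·.2)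

-- ===== PRECONDITION & SPEC =====
-- Pre_ excludes exactly the inputs where Python A raises: the empty matrix (IndexError on
-- newMatrice[0]) and matrices with a row of fewer than 4 entries (IndexError on row[3]/row[2]).
def Pre_findBestTrinome (newMatrice : List (List Int)) : Prop :=
  newMatrice ≠ [] ∧ ∀ r ∈ newMatrice, 4 ≤ r.length
instance (newMatrice : List (List Int)) : Decidable (Pre_findBestTrinome newMatrice) := by
  unfold Pre_findBestTrinome; infer_instance
def pvWitness_findBestTrinome : List (List Int) := [[1, 2, 3, 4], [5, 6, 3, 2]]

def Spec_findBestTrinome (newMatrice : List (List Int)) (out : List (List Int)) : Prop := out = findBestTrinome_alt newMatrice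
instance (newMatrice : List (List Int)) (out : List (List Int)) : Decidable (Spec_findBestTrinome newMatrice out) := by unfold Spec_findBestTrinome; infer_instance

-- ===== CLAIM (what is proved, stated in full; the proofs are below) =====
def Claim_equal_findBestTrinome : Prop := ∀ (newMatrice : List (List Int)), Dom_findBestTrinome newMatrice → Pre_findBestTrinome newMatrice → Spec_findBestTrinome newMatrice (findBestTrinome newMatrice)

-- ===== LEMMAS AND PROOFS =====

-- B's best-index fold, once started, is 'some' of A's argmax fold.
theorem bestFold (m : List (List Int)) (l : List Int) (b : Int) :
    l.foldl (fun (s : Option Int) j =>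
        match s with
        | none => some j
        | some b => if PySem.List.pyGetD (PySem.List.pyGetD m b []) 3 0 <
                       PySem.List.pyGetD (PySem.List.pyGetD m j []) 3 0 then some j else some b)
      (some b)
    = some (l.foldl (fun b j => if PySem.List.pyGetD (PySem.List.pyGetD m b []) 3 0 <
                       PySem.List.pyGetD (PySem.List.pyGetD m j []) 3 0 then j else b) b) := by
  induction l generalizing b with
  | nil => rfl
  | cons x xs ih =>
    simp only [List.foldl_cons]
    rw [← apply_ite some]
    exact ih _

-- reading the grouping dict back: the entries whose key is v, in insertion order.
theorem groupFold (l : List (Int × List Int)) (d : PySem.Dict Int (List (Int × List Int)))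
    (v : Int) :
    (l.foldl (fun d p => d.modify (PySem.List.pyGetD p.2 2 0) [] (· ++ [p])) d).getD v []
      = d.getD v [] ++ l.filter (fun p => PySem.List.pyGetD p.2 2 0 == v) := by
  induction l generalizing d with
  | nil => simp
  | cons x xs ih =>
    simp only [List.foldl_cons, List.filter_cons]
    rw [ih]
    by_cases h : PySem.List.pyGetD x.2 2 0 = v
    · subst h
      rw [PySem.Dict.getD_modify_self]
      simp
    · rw [PySem.Dict.getD_modify_of_ne]
      · simp [h]
      · exact fun hv => h hv.symm

-- ===== VERDICT (by name: the statement is the Claim_ definition above) =====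
theorem findBestTrinome_spec : Claim_equal_findBestTrinome := by
  intro m _ hpre
  obtain ⟨hne, _⟩ := hpre
  unfold Spec_findBestTrinome findBestTrinome findBestTrinome_alt
  rw [PySem.List.enumerate_eq_map_pyRange (d := []), List.foldl_map]
  rw [PySem.List.foldl_prod_mk
    (f := fun (d : PySem.Dict Int (List (Int × List Int))) (j : Int) =>
      d.modify (PySem.List.pyGetD (PySem.List.pyGetD m j []) 2 0) []
        (· ++ [(j, PySem.List.pyGetD m j [])]))
    (g := fun (s : Option Int) (j : Int) =>
      match s with
      | none => some j
      | some b =>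
        if PySem.List.pyGetD (PySem.List.pyGetD m b []) 3 0 <
           PySem.List.pyGetD (PySem.List.pyGetD m j []) 3 0 then some j else some b)]
  simp only [PySem.List.len_eq]
  have h0 : (0:Int) < (m.length : Int) := by
    have := List.length_pos_iff.mpr hne
    exact_mod_cast this
  rw [show (PySem.List.pyRange 0 (m.length : Int) 1).foldl
      (fun (s : Option Int) (j : Int) =>
        match s with
        | none => some j
        | some b =>
          if PySem.List.pyGetD (PySem.List.pyGetD m b []) 3 0 <
             PySem.List.pyGetD (PySem.List.pyGetD m j []) 3 0 then some j else some b) none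
      = some ((PySem.List.pyRange 0 (m.length : Int) 1).foldl
          (fun (k j : Int) =>
            if PySem.List.pyGetD (PySem.List.pyGetD m k []) 3 0 <
               PySem.List.pyGetD (PySem.List.pyGetD m j []) 3 0 then j else k) 0) from by
    rw [PySem.List.pyRange_one_cons h0]
    simp only [List.foldl_cons]
    rw [bestFold]
    congr 1
    simp]
  simp only []
  generalize (List.foldl (fun (k j : Int) =>
      if PySem.List.pyGetD (PySem.List.pyGetD m k []) 3 0 <
         PySem.List.pyGetD (PySem.List.pyGetD m j []) 3 0 then j else k) 0
      (PySem.List.pyRange 0 (m.length : Int) 1)) = k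
  rw [PySem.List.foldl_append_if]
  rw [show (List.foldl (fun (d : PySem.Dict Int (List (Int × List Int))) (j : Int) =>
        d.modify (PySem.List.pyGetD (PySem.List.pyGetD m j []) 2 0) []
          (fun x => x ++ [(j, PySem.List.pyGetD m j [])])) PySem.Dict.empty
        (PySem.List.pyRange 0 (m.length : Int) 1)).getD
        (PySem.List.pyGetD (PySem.List.pyGetD m k []) 2 0) []
      = ((PySem.List.pyRange 0 (m.length : Int) 1).map
          (fun j => (j, PySem.List.pyGetD m j []))).filter
          (fun p => PySem.List.pyGetD p.2 2 0 ==
            PySem.List.pyGetD (PySem.List.pyGetD m k []) 2 0) from by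
    rw [← List.foldl_map (f := fun j => (j, PySem.List.pyGetD m j []))
        (g := fun (d : PySem.Dict Int (List (Int × List Int))) (p : Int × List Int) =>
          d.modify (PySem.List.pyGetD p.2 2 0) [] (fun x => x ++ [p]))]
    rw [groupFold]
    simp [PySem.Dict.getD_empty]]
  simp only [List.filter_map, List.filter_filter, List.map_map,
    Function.comp_def, List.singleton_append]
  congr 1
  congr 1
  apply List.filter_congr
  intro a _
  rw [Bool.and_comm, bne_comm]
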